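-- pv_equiv track=rewrite | github.com/meta-xucong/omniauto | workflows/generated/desktop/minesweeper_solver.py | split_frontier_components
-- ===== SOURCE A (Python) =====
-- from collections import defaultdict
--
-- def split_frontier_components(
--
--     frontier: set[tuple[int, int]],
--     constraints: list[tuple[list[tuple[int, int]], int]],
-- ) -> list[tuple[list[tuple[int, int]], list[tuple[list[tuple[int, int]], int]]]]:
--     if not frontier:
--         return []
--     cell_to_constraints: dict[tuple[int, int], list[int]] = defaultdict(list)
--     for idx, (cells, _) in enumerate(constraints):
--         for cell in cells:
--             if cell in frontier:
--                 cell_to_constraints[cell].append(idx)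
--
--     remaining = set(frontier)
--     components: list[tuple[list[tuple[int, int]], list[tuple[list[tuple[int, int]], int]]]] = []
--     while remaining:
--         start = next(iter(remaining))
--         queue = [start]
--         comp_cells: set[tuple[int, int]] = set()
--         comp_constraint_ids: set[int] = set()
--         while queue:
--             cell = queue.pop()
--             if cell in comp_cells:
--                 continue
--             comp_cells.add(cell)
--             remaining.discard(cell)
--             for cid in cell_to_constraints.get(cell, []):
--                 if cid in comp_constraint_ids:
--                     continue
--                 comp_constraint_ids.add(cid)
--                 for other in constraints[cid][0]:
--                     if other in frontier and other not in comp_cells: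
--                         queue.append(other)
--         comp_constraints = [constraints[cid] for cid in sorted(comp_constraint_ids)]
--         components.append((sorted(comp_cells), comp_constraints))
--     return components
-- ===== SOURCE B (Python) =====
-- def split_frontier_components(
--     frontier: set[tuple[int, int]],
--     constraints: list[tuple[list[tuple[int, int]], int]],
-- ) -> list[tuple[list[tuple[int, int]], list[tuple[list[tuple[int, int]], int]]]]:
--     components = []
--     done = set()
--     for start in frontier:
--         if start in done:
--             continue
--         comp = {start}
--         changed = True
--         while changed:
--             changed = False
--             for cells, _ in constraints:
--                 fcells = [c for c in cells if c in frontier]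
--                 if any(c in comp for c in fcells):
--                     for c in fcells:
--                         if c not in comp:
--                             comp.add(c)
--                             changed = True
--         ids = [i for i, (cells, _) in enumerate(constraints)
--                if any(c in frontier and c in comp for c in cells)]
--         done |= comp
--         components.append((sorted(comp), [constraints[i] for i in ids]))
--     return components
-- ===== Notes on version B (the rewrite author's own statement) =====
-- stated objective: simpler
-- what changed: A builds a cell-to-constraint-index defaultdict and runs an explicit-stack worklist traversal per component with a mutable 'remaining' set; B drops the dict, the stack and 'remaining' entirely and instead saturates each component to a fixpoint by repeated passes over the constraint list, skipping cells already placed in an emitted component.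
import Mathlib
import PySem

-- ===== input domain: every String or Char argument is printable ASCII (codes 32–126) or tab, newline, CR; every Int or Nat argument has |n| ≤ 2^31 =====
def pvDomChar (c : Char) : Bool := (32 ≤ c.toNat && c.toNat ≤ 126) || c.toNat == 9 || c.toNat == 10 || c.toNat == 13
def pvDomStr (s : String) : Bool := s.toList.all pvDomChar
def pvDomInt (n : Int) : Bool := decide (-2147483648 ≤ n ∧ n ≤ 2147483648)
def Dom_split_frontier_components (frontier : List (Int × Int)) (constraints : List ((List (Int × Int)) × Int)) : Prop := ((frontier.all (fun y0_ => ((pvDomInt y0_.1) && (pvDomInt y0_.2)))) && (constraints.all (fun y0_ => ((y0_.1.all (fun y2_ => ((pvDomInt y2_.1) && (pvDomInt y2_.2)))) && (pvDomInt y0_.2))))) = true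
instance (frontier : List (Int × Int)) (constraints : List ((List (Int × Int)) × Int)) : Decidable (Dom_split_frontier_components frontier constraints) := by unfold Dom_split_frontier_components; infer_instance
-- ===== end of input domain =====

-- B replaces A's dict-indexed explicit-stack worklist with a fixpoint saturation over the
-- constraint list (no cell→constraint dict, no queue, no mutable 'remaining' set); objective:
-- simpler. Equal return value proved on the whole domain (A is total).
-- ===== PORT A =====
-- cell_to_constraints: defaultdict(list); for idx,(cells,_) in enumerate(constraints): for cell in cells: if cell in frontier: d[cell].append(idx)
def pvC2C (frontier : List (Int × Int)) (constraints : List ((List (Int × Int)) × Int)) :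
    PySem.Dict (Int × Int) (List Int) :=
  (PySem.List.enumerate constraints).foldl (fun d p =>
    p.2.1.foldl (fun d cell =>
      if PySem.Set.contains frontier cell then d.modify cell [] (fun l => l ++ [p.1]) else d) d)
    PySem.Dict.empty

-- inner 'while queue' worklist of A, with a fuel bound large enough to be proved never to run out
def pvAStep (frontier : List (Int × Int)) (constraints : List ((List (Int × Int)) × Int))
    (c2c : PySem.Dict (Int × Int) (List Int)) :
    Nat → List (Int × Int) → PySem.Set (Int × Int) → PySem.Set Int → PySem.Set (Int × Int) →
    PySem.Set (Int × Int) × PySem.Set Int × PySem.Set (Int × Int)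
  | 0, _, comp, ids, rem => (comp, ids, rem)
  | fuel + 1, queue, comp, ids, rem =>
    match queue with
    | [] => (comp, ids, rem)
    | q0 :: qs =>
      -- cell = queue.pop()  (pop from the end)
      let cell := (q0 :: qs).getLast (by simp)
      let queue' := (q0 :: qs).dropLast
      if PySem.Set.contains comp cell then
        pvAStep frontier constraints c2c fuel queue' comp ids rem
      else
        let comp' := PySem.Set.add comp cell
        let rem' := PySem.Set.discard rem cell
        -- for cid in cell_to_constraints.get(cell, []): … queue.append(other)
        let st := (c2c.getD cell []).foldl
          (fun (st : List (Int × Int) × PySem.Set Int) cid =>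
            if PySem.Set.contains st.2 cid then st
            else
              ((PySem.List.pyGetD constraints cid ([], 0)).1.foldl
                 (fun q other =>
                   if PySem.Set.contains frontier other && !(PySem.Set.contains comp' other)
                   then q ++ [other] else q) st.1,
               PySem.Set.add st.2 cid))
          (queue', ids)
        pvAStep frontier constraints c2c fuel st.1 comp' st.2 rem'

-- outer 'while remaining' loop of A (start = next(iter(remaining)) = first element)
def pvAOuter (frontier : List (Int × Int)) (constraints : List ((List (Int × Int)) × Int))
    (c2c : PySem.Dict (Int × Int) (List Int)) (fuelI : Nat) :
    Nat → PySem.Set (Int × Int) → List ((List (Int × Int)) × (List ((List (Int × Int)) × Int))) →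
    List ((List (Int × Int)) × (List ((List (Int × Int)) × Int)))
  | 0, _, acc => acc
  | fuel + 1, rem, acc =>
    match rem with
    | [] => acc
    | start :: _ =>
      let r := pvAStep frontier constraints c2c fuelI [start] PySem.Set.empty PySem.Set.empty rem
      pvAOuter frontier constraints c2c fuelI fuel r.2.2
        (acc ++ [(PySem.List.sorted r.1 (fun c => (toLex (c.1, c.2) : Lex (Int × Int))),
                  (PySem.List.sorted r.2.1 (fun i => i)).map
                    (fun cid => PySem.List.pyGetD constraints cid ([], 0)))])

def split_frontier_components (frontier : List (Int × Int)) (constraints : List ((List (Int × Int)) × Int)) : List ((List (Int × Int)) × (List ((List (Int × Int)) × Int))) :=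
  if frontier.isEmpty then []
  else
    pvAOuter frontier constraints (pvC2C frontier constraints)
      (frontier.length + (constraints.map (fun t => t.1.length)).sum + 2)
      (frontier.length + 1) (PySem.Set.ofList frontier) []

-- ===== PORT B =====
-- B's 'while changed' saturation loop, fuel = |frontier| + 1 (each extra round adds a cell; proved sufficient below)
def pvGrow (frontier : List (Int × Int)) (constraints : List ((List (Int × Int)) × Int)) :
    Nat → PySem.Set (Int × Int) → PySem.Set (Int × Int)
  | 0, comp => comp
  | fuel + 1, comp =>
    let st := constraints.foldl
      (fun (st : PySem.Set (Int × Int) × Bool) t =>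
        let fcells := t.1.filter (fun c => PySem.Set.contains frontier c)
        if fcells.any (fun c => PySem.Set.contains st.1 c) then
          fcells.foldl (fun st c =>
            if PySem.Set.contains st.1 c then st else (PySem.Set.add st.1 c, true)) st
        else st)
      (comp, false)
    if st.2 then pvGrow frontier constraints fuel st.1 else st.1

def split_frontier_components_alt (frontier : List (Int × Int)) (constraints : List ((List (Int × Int)) × Int)) : List ((List (Int × Int)) × (List ((List (Int × Int)) × Int))) :=
  (frontier.foldl
    (fun (st : PySem.Set (Int × Int) × List ((List (Int × Int)) × (List ((List (Int × Int)) × Int)))) start =>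
      if PySem.Set.contains st.1 start then st
      else
        let comp := pvGrow frontier constraints (frontier.length + 1)
          (PySem.Set.add PySem.Set.empty start)
        let ids := (PySem.List.enumerate constraints).foldl
          (fun acc p =>
            if p.2.1.any (fun c => PySem.Set.contains frontier c && PySem.Set.contains comp c)
            then acc ++ [p.1] else acc) []
        (PySem.Set.update st.1 comp,
         st.2 ++ [(PySem.List.sorted comp (fun c => (toLex (c.1, c.2) : Lex (Int × Int))),
                   ids.map (fun i => PySem.List.pyGetD constraints i ([], 0)))]))
    (PySem.Set.empty, [])).2

-- ===== PRECONDITION & SPEC =====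
def Spec_split_frontier_components (frontier : List (Int × Int)) (constraints : List ((List (Int × Int)) × Int)) (out : List ((List (Int × Int)) × (List ((List (Int × Int)) × Int)))) : Prop := out = split_frontier_components_alt frontier constraints
instance (frontier : List (Int × Int)) (constraints : List ((List (Int × Int)) × Int)) (out : List ((List (Int × Int)) × (List ((List (Int × Int)) × Int)))) : Decidable (Spec_split_frontier_components frontier constraints out) := by unfold Spec_split_frontier_components; infer_instance

-- ===== CLAIM (what is proved, stated in full; the proofs are below) =====
def Claim_equal_split_frontier_components : Prop := ∀ (frontier : List (Int × Int)) (constraints : List ((List (Int × Int)) × Int)), Dom_split_frontier_components frontier constraints → Spec_split_frontier_components frontier constraints (split_frontier_components frontier constraints)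

-- ===== LEMMAS AND PROOFS =====

-- Two frontier cells are adjacent when some constraint mentions both; pvReach is the
-- resulting connectivity relation both programs compute components of.
def pvAdj (fr : List (Int × Int)) (cs : List ((List (Int × Int)) × Int)) (c d : Int × Int) : Prop :=
  c ∈ fr ∧ d ∈ fr ∧ ∃ t ∈ cs, c ∈ t.1 ∧ d ∈ t.1

def pvReach (fr : List (Int × Int)) (cs : List ((List (Int × Int)) × Int)) :
    (Int × Int) → (Int × Int) → Prop :=
  Relation.ReflTransGen (pvAdj fr cs)

-- cell count still chargeable to constraint indices outside ids: the fuel measure of A's inner loop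
def pvPend (cs : List ((List (Int × Int)) × Int)) (ids : PySem.Set Int) : Nat :=
  ∑ k ∈ Finset.range cs.length, (if (k : Int) ∈ ids then 0 else (cs.getD k ([], 0)).1.length)

lemma pvLenSum (cs : List ((List (Int × Int)) × Int)) :
    ∑ k ∈ Finset.range cs.length, (cs.getD k ([], 0)).1.length
      = (cs.map (fun t => t.1.length)).sum := by
  induction cs with
  | nil => simp
  | cons t ts ih =>
    rw [List.length_cons, Finset.sum_range_succ']
    simp only [List.getD_cons_succ, List.getD_cons_zero, List.map_cons, List.sum_cons, ih]
    omega

lemma pvPend_le_sum (cs : List ((List (Int × Int)) × Int)) (ids : PySem.Set Int) :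
    pvPend cs ids ≤ (cs.map (fun t => t.1.length)).sum := by
  rw [← pvLenSum]
  exact Finset.sum_le_sum (fun k _ => by split <;> omega)

lemma pvPend_add_le (cs : List ((List (Int × Int)) × Int)) (ids : PySem.Set Int) (k : Nat)
    (hk : k < cs.length) (hki : (k : Int) ∉ ids) :
    pvPend cs (PySem.Set.add ids (k : Int)) + (cs.getD k ([], 0)).1.length ≤ pvPend cs ids := by
  unfold pvPend
  have hmem : k ∈ Finset.range cs.length := Finset.mem_range.2 hk
  rw [← Finset.add_sum_erase _ _ hmem, ← Finset.add_sum_erase _ _ hmem]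
  have h1 : (if (k : Int) ∈ PySem.Set.add ids (k : Int) then 0 else (cs.getD k ([], 0)).1.length) = 0 := by
    simp [PySem.Set.mem_add]
  have h2 : (if (k : Int) ∈ ids then 0 else (cs.getD k ([], 0)).1.length) = (cs.getD k ([], 0)).1.length := by
    simp [hki]
  rw [h1, h2]
  have h3 : ∑ x ∈ (Finset.range cs.length).erase k,
        (if (x : Int) ∈ PySem.Set.add ids (k : Int) then 0 else (cs.getD x ([], 0)).1.length)
      ≤ ∑ x ∈ (Finset.range cs.length).erase k,
        (if (x : Int) ∈ ids then 0 else (cs.getD x ([], 0)).1.length) := by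
    refine Finset.sum_le_sum (fun x _ => ?_)
    by_cases hx : (x : Int) ∈ ids
    · simp [hx, PySem.Set.mem_add]
    · simp [hx]; split <;> omega
  omega

lemma pvC2C_cells_fold (fr : List (Int × Int)) (j : Int) (cells : List (Int × Int))
    (d : PySem.Dict (Int × Int) (List Int)) (c : Int × Int) (i : Int) :
    i ∈ (cells.foldl (fun d cell =>
          if PySem.Set.contains fr cell then d.modify cell [] (fun l => l ++ [j]) else d) d).getD c []
      ↔ i ∈ d.getD c [] ∨ (i = j ∧ c ∈ fr ∧ c ∈ cells) := by
  induction cells generalizing d with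
  | nil => simp
  | cons x xs ih =>
    simp only [List.foldl_cons]
    by_cases hx : PySem.Set.contains fr x
    · rw [if_pos hx, ih]
      rw [PySem.Dict.getD_modify]
      have hxf : x ∈ fr := (PySem.Set.contains_iff fr x).1 hx
      by_cases hcx : c = x
      · subst hcx
        rw [if_pos rfl]
        simp only [List.mem_append, List.mem_singleton]
        constructor
        · rintro ((h | h) | h) <;> tauto
        · rintro (h | ⟨h1, _, _⟩) <;> tauto
      · rw [if_neg hcx]
        simp only [List.mem_cons]
        constructor
        · rintro (h | h) <;> tauto
        · rintro (h | ⟨h1, h2, (h3 | h3)⟩)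
          · tauto
          · exact absurd h3 hcx
          · tauto
    · rw [if_neg hx, ih]
      have hxf : x ∉ fr := fun h => hx ((PySem.Set.contains_iff fr x).2 h)
      simp only [List.mem_cons]
      constructor
      · rintro (h | h) <;> tauto
      · rintro (h | ⟨h1, h2, (h3 | h3)⟩)
        · tauto
        · subst h3; exact absurd h2 hxf
        · tauto

lemma mem_getD_pvC2C_aux (fr : List (Int × Int)) (l : List ((List (Int × Int)) × Int)) (j : Int)
    (d : PySem.Dict (Int × Int) (List Int)) (c : Int × Int) (i : Int) :
    i ∈ ((PySem.List.enumerate l j).foldl (fun d p =>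
          p.2.1.foldl (fun d cell =>
            if PySem.Set.contains fr cell then d.modify cell [] (fun l => l ++ [p.1]) else d) d) d).getD c []
      ↔ i ∈ d.getD c [] ∨ (c ∈ fr ∧ ∃ k : Nat, k < l.length ∧ i = j + (k : Int) ∧ c ∈ (l.getD k ([], 0)).1) := by
  induction l generalizing j d with
  | nil => simp [PySem.List.enumerate]
  | cons t ts ih =>
    rw [PySem.List.enumerate.eq_2, List.foldl_cons, ih, pvC2C_cells_fold]
    constructor
    · rintro ((h | ⟨h1, h2, h3⟩) | ⟨h1, k, hk, hik, hc⟩)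
      · exact Or.inl h
      · exact Or.inr ⟨h2, 0, by simp, by simpa using h1, by simpa using h3⟩
      · exact Or.inr ⟨h1, k + 1, by simpa using hk, by push_cast; omega, by simpa using hc⟩
    · rintro (h | ⟨h1, k, hk, hik, hc⟩)
      · exact Or.inl (Or.inl h)
      · cases k with
        | zero => exact Or.inl (Or.inr ⟨by simpa using hik, h1, by simpa using hc⟩)
        | succ k' =>
          refine Or.inr ⟨h1, k', by simp at hk; omega, by push_cast at hik ⊢; omega, by simpa using hc⟩

lemma mem_getD_pvC2C (fr : List (Int × Int)) (cs : List ((List (Int × Int)) × Int))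
    (c : Int × Int) (i : Int) :
    i ∈ (pvC2C fr cs).getD c []
      ↔ c ∈ fr ∧ ∃ k : Nat, k < cs.length ∧ i = (k : Int) ∧ c ∈ (cs.getD k ([], 0)).1 := by
  unfold pvC2C
  rw [mem_getD_pvC2C_aux]
  simp [PySem.Dict.getD_empty]

lemma pvContains_eq_decide {α : Type} [BEq α] [LawfulBEq α] (s : PySem.Set α) (x : α) :
    PySem.Set.contains s x = decide (x ∈ s) := by
  by_cases h : x ∈ s
  · rw [(PySem.Set.contains_iff s x).2 h]; simp [h]
  · have hf : PySem.Set.contains s x = false := by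
      cases hcx : PySem.Set.contains s x
      · rfl
      · exact absurd ((PySem.Set.contains_iff s x).1 hcx) h
    rw [hf]; simp [h]

-- conclusions of the inner loop once the queue is empty

-- A's inner for-cid loop body, named so its fold can be characterised
def pvCidStep (fr : List (Int × Int)) (cs : List ((List (Int × Int)) × Int))
    (comp' : PySem.Set (Int × Int)) (st : List (Int × Int) × PySem.Set Int) (cid : Int) :
    List (Int × Int) × PySem.Set Int :=
  if PySem.Set.contains st.2 cid then st
  else
    ((PySem.List.pyGetD cs cid ([], 0)).1.foldl
       (fun q other =>
         if PySem.Set.contains fr other && !(PySem.Set.contains comp' other)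
         then q ++ [other] else q) st.1,
     PySem.Set.add st.2 cid)

lemma pvCidFold_spec (fr : List (Int × Int)) (cs : List ((List (Int × Int)) × Int))
    (comp' : PySem.Set (Int × Int)) (L : List Int)
    (hL : ∀ i ∈ L, ∃ k : Nat, k < cs.length ∧ i = (k : Int)) :
    ∀ (q : List (Int × Int)) (ids : PySem.Set Int), ids.Nodup →
    (L.foldl (pvCidStep fr cs comp') (q, ids)).2.Nodup ∧
    (∀ j, j ∈ (L.foldl (pvCidStep fr cs comp') (q, ids)).2 ↔ j ∈ ids ∨ j ∈ L) ∧
    (∀ d ∈ q, d ∈ (L.foldl (pvCidStep fr cs comp') (q, ids)).1) ∧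
    (∀ d ∈ (L.foldl (pvCidStep fr cs comp') (q, ids)).1,
        d ∈ q ∨ ∃ i ∈ L, d ∈ (PySem.List.pyGetD cs i ([], 0)).1 ∧ d ∈ fr ∧ d ∉ comp') ∧
    (∀ i ∈ L, i ∈ ids ∨ ∀ d ∈ (PySem.List.pyGetD cs i ([], 0)).1, d ∈ fr → d ∉ comp' →
        d ∈ (L.foldl (pvCidStep fr cs comp') (q, ids)).1) ∧
    ((L.foldl (pvCidStep fr cs comp') (q, ids)).1.length
       + pvPend cs (L.foldl (pvCidStep fr cs comp') (q, ids)).2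
      ≤ q.length + pvPend cs ids) := by
  induction L with
  | nil =>
    intro q ids hnd
    exact ⟨hnd, by simp, by simp, by simp, by simp, le_refl _⟩
  | cons i L' ih =>
    intro q ids hnd
    have hL' : ∀ j ∈ L', ∃ k : Nat, k < cs.length ∧ j = (k : Int) :=
      fun j hj => hL j (List.mem_cons_of_mem i hj)
    simp only [List.foldl_cons]
    by_cases hi : PySem.Set.contains ids i
    · rw [show pvCidStep fr cs comp' (q, ids) i = (q, ids) from by
        unfold pvCidStep; rw [if_pos hi]]
      have him : i ∈ ids := (PySem.Set.contains_iff ids i).1 hi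
      obtain ⟨j1, j2, j3, j4, j5, j6⟩ := ih hL' q ids hnd
      refine ⟨j1, ?_, j3, ?_, ?_, j6⟩
      · intro j
        rw [j2]
        simp only [List.mem_cons]
        constructor
        · rintro (h | h) <;> tauto
        · rintro (h | rfl | h)
          · tauto
          · exact Or.inl him
          · tauto
      · intro d hd
        rcases j4 d hd with h | ⟨a, ha, h⟩
        · exact Or.inl h
        · exact Or.inr ⟨a, List.mem_cons_of_mem i ha, h⟩
      · intro a ha
        rcases List.mem_cons.1 ha with rfl | ha'
        · exact Or.inl him
        · exact j5 a ha'
    · have hinot : i ∉ ids := fun h => hi ((PySem.Set.contains_iff ids i).2 h)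
      set q2 := (PySem.List.pyGetD cs i ([], 0)).1.foldl
        (fun q other =>
          if PySem.Set.contains fr other && !(PySem.Set.contains comp' other)
          then q ++ [other] else q) q with hq2
      have hq2eq : q2 = q ++ (PySem.List.pyGetD cs i ([], 0)).1.filter
          (fun other => PySem.Set.contains fr other && !(PySem.Set.contains comp' other)) := by
        rw [hq2, PySem.List.foldl_append_if_eq_filter]
      rw [show pvCidStep fr cs comp' (q, ids) i = (q2, PySem.Set.add ids i) from by
        unfold pvCidStep; rw [if_neg hi]]
      obtain ⟨j1, j2, j3, j4, j5, j6⟩ := ih hL' q2 (PySem.Set.add ids i) (PySem.Set.nodup_add ids i hnd)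
      refine ⟨j1, ?_, ?_, ?_, ?_, ?_⟩
      · intro j
        rw [j2, PySem.Set.mem_add]
        simp only [List.mem_cons]
        tauto
      · intro d hd
        apply j3
        rw [hq2eq]
        exact List.mem_append_left _ hd
      · intro d hd
        rcases j4 d hd with h | ⟨a, ha, h⟩
        · rw [hq2eq] at h
          rcases List.mem_append.1 h with h' | h'
          · exact Or.inl h'
          · rw [List.mem_filter] at h'
            obtain ⟨hm, hb⟩ := h'
            rw [Bool.and_eq_true, Bool.not_eq_true'] at hb
            refine Or.inr ⟨i, List.mem_cons_self, hm, (PySem.Set.contains_iff fr d).1 hb.1, ?_⟩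
            intro hmem
            rw [(PySem.Set.contains_iff comp' d).2 hmem] at hb
            exact absurd hb.2 (by simp)
        · exact Or.inr ⟨a, List.mem_cons_of_mem i ha, h⟩
      · intro a ha
        rcases List.mem_cons.1 ha with rfl | ha'
        · right
          intro d hd hdf hdc
          apply j3
          rw [hq2eq]
          refine List.mem_append_right _ ?_
          rw [List.mem_filter]
          refine ⟨hd, ?_⟩
          rw [Bool.and_eq_true, Bool.not_eq_true']
          refine ⟨(PySem.Set.contains_iff fr d).2 hdf, ?_⟩
          rw [Bool.eq_false_iff]
          intro hc
          exact hdc ((PySem.Set.contains_iff comp' d).1 hc)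
        · rcases j5 a ha' with h | h
          · rw [PySem.Set.mem_add] at h
            rcases h with h | rfl
            · exact Or.inl h
            · right
              intro d hd hdf hdc
              apply j3
              rw [hq2eq]
              refine List.mem_append_right _ ?_
              rw [List.mem_filter]
              refine ⟨hd, ?_⟩
              rw [Bool.and_eq_true, Bool.not_eq_true']
              refine ⟨(PySem.Set.contains_iff fr d).2 hdf, ?_⟩
              rw [Bool.eq_false_iff]
              intro hc
              exact hdc ((PySem.Set.contains_iff comp' d).1 hc)
          · exact Or.inr h
      · -- measure
        obtain ⟨k, hk, rfl⟩ := hL i List.mem_cons_self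
        have hpend := pvPend_add_le cs ids k hk hinot
        have hlen : q2.length ≤ q.length + (cs.getD k ([], 0)).1.length := by
          rw [hq2eq, List.length_append, PySem.List.pyGetD_natCast]
          have := List.length_filter_le
            (fun other => PySem.Set.contains fr other && !(PySem.Set.contains comp' other))
            ((cs.getD k ([], 0)).1)
          omega
        refine le_trans j6 ?_
        omega

lemma pvAStep_final (fr : List (Int × Int)) (cs : List ((List (Int × Int)) × Int))
    (start : Int × Int) (comp : PySem.Set (Int × Int)) (ids : PySem.Set Int)
    (h3 : ∀ c ∈ comp, c ∈ fr ∧ pvReach fr cs start c)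
    (h5 : start ∈ comp)
    (h6 : ∀ i ∈ ids, ∃ c ∈ comp, i ∈ (pvC2C fr cs).getD c [])
    (h7 : ∀ c ∈ comp, ∀ i ∈ (pvC2C fr cs).getD c [], i ∈ ids)
    (h8 : ∀ i ∈ ids, ∀ k : Nat, k < cs.length → i = (k : Int) →
       ∀ d ∈ (cs.getD k ([], 0)).1, d ∈ fr → d ∈ comp) :
    (∀ c, c ∈ comp ↔ c ∈ fr ∧ pvReach fr cs start c) ∧
    (∀ i, i ∈ ids ↔ ∃ c, (c ∈ fr ∧ pvReach fr cs start c) ∧ i ∈ (pvC2C fr cs).getD c []) := by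
  have hclosed : ∀ a ∈ comp, ∀ b, pvAdj fr cs a b → b ∈ comp := by
    rintro a ha b ⟨haf, hbf, t, ht, hat, hbt⟩
    obtain ⟨k, hk, hkt⟩ := List.mem_iff_getElem.1 ht
    have hgetd : cs.getD k ([], 0) = t := by
      rw [List.getD_eq_getElem cs ([], 0) hk, hkt]
    have hic : (k : Int) ∈ (pvC2C fr cs).getD a [] := by
      rw [mem_getD_pvC2C]
      exact ⟨haf, k, hk, rfl, by rw [hgetd]; exact hat⟩
    have hik := h7 a ha _ hic
    exact h8 _ hik k hk rfl b (by rw [hgetd]; exact hbt) hbf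
  have hmem : ∀ c, c ∈ comp ↔ c ∈ fr ∧ pvReach fr cs start c := by
    intro c
    refine ⟨fun hc => h3 c hc, ?_⟩
    rintro ⟨hcf, hcr⟩
    clear hcf
    induction hcr with
    | refl => exact h5
    | tail hr hadj ihp => exact hclosed _ ihp _ hadj
  refine ⟨hmem, fun i => ⟨?_, ?_⟩⟩
  · intro hi
    obtain ⟨c, hc, hg⟩ := h6 i hi
    exact ⟨c, (hmem c).1 hc, hg⟩
  · rintro ⟨c, hc, hg⟩
    exact h7 c ((hmem c).2 hc) i hg

lemma pvAStep_spec (fr : List (Int × Int)) (cs : List ((List (Int × Int)) × Int))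
    (start : Int × Int) (rem0 : List (Int × Int)) :
    ∀ (fuel : Nat) (queue : List (Int × Int)) (comp : PySem.Set (Int × Int)) (ids : PySem.Set Int),
    comp.Nodup → ids.Nodup →
    (∀ c ∈ comp, c ∈ fr ∧ pvReach fr cs start c) →
    (∀ c ∈ queue, c ∈ fr ∧ pvReach fr cs start c) →
    (start ∈ comp ∨ start ∈ queue) →
    (∀ i ∈ ids, ∃ c ∈ comp, i ∈ (pvC2C fr cs).getD c []) →
    (∀ c ∈ comp, ∀ i ∈ (pvC2C fr cs).getD c [], i ∈ ids) →
    (∀ i ∈ ids, ∀ k : Nat, k < cs.length → i = (k : Int) →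
       ∀ d ∈ (cs.getD k ([], 0)).1, d ∈ fr → d ∈ comp ∨ d ∈ queue) →
    queue.length + pvPend cs ids ≤ fuel →
    (pvAStep fr cs (pvC2C fr cs) fuel queue comp ids
        (rem0.filter (fun c => !(PySem.Set.contains comp c)))).1.Nodup ∧
    (∀ c, c ∈ (pvAStep fr cs (pvC2C fr cs) fuel queue comp ids
        (rem0.filter (fun c => !(PySem.Set.contains comp c)))).1
       ↔ c ∈ fr ∧ pvReach fr cs start c) ∧
    (pvAStep fr cs (pvC2C fr cs) fuel queue comp ids
        (rem0.filter (fun c => !(PySem.Set.contains comp c)))).2.1.Nodup ∧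
    (∀ i, i ∈ (pvAStep fr cs (pvC2C fr cs) fuel queue comp ids
        (rem0.filter (fun c => !(PySem.Set.contains comp c)))).2.1
       ↔ ∃ c, (c ∈ fr ∧ pvReach fr cs start c) ∧ i ∈ (pvC2C fr cs).getD c []) ∧
    (pvAStep fr cs (pvC2C fr cs) fuel queue comp ids
        (rem0.filter (fun c => !(PySem.Set.contains comp c)))).2.2
      = rem0.filter (fun c => !(PySem.Set.contains (pvAStep fr cs (pvC2C fr cs) fuel queue comp ids
          (rem0.filter (fun c => !(PySem.Set.contains comp c)))).1 c)) := by
  intro fuel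
  induction fuel with
  | zero =>
    intro queue comp ids hnd hidnd h3 h4 h5 h6 h7 h8 hbound
    have hq : queue = [] := by
      rw [List.eq_nil_iff_length_eq_zero]; omega
    subst hq
    have h5' : start ∈ comp := by rcases h5 with h | h; exact h; cases h
    have h8' : ∀ i ∈ ids, ∀ k : Nat, k < cs.length → i = (k : Int) →
        ∀ d ∈ (cs.getD k ([], 0)).1, d ∈ fr → d ∈ comp := by
      intro i hi k hk hik d hd hdf
      rcases h8 i hi k hk hik d hd hdf with h | h; exact h; cases h
    obtain ⟨m1, m2⟩ := pvAStep_final fr cs start comp ids h3 h5' h6 h7 h8'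
    exact ⟨hnd, m1, hidnd, m2, rfl⟩
  | succ f ih =>
    intro queue comp ids hnd hidnd h3 h4 h5 h6 h7 h8 hbound
    match hq : queue with
    | [] =>
      have h5' : start ∈ comp := by rcases h5 with h | h; exact h; cases h
      have h8' : ∀ i ∈ ids, ∀ k : Nat, k < cs.length → i = (k : Int) →
          ∀ d ∈ (cs.getD k ([], 0)).1, d ∈ fr → d ∈ comp := by
        intro i hi k hk hik d hd hdf
        rcases h8 i hi k hk hik d hd hdf with h | h; exact h; cases h
      obtain ⟨m1, m2⟩ := pvAStep_final fr cs start comp ids h3 h5' h6 h7 h8'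
      exact ⟨hnd, m1, hidnd, m2, rfl⟩
    | q0 :: qs =>
      set cell := (q0 :: qs).getLast (by simp) with hcell
      set queue' := (q0 :: qs).dropLast with hqueue'
      have hsplit : queue' ++ [cell] = q0 :: qs := List.dropLast_append_getLast (by simp)
      have hmemsplit : ∀ d, d ∈ q0 :: qs ↔ d ∈ queue' ∨ d = cell := by
        intro d
        rw [← hsplit, List.mem_append, List.mem_singleton]
      have hcellq : cell ∈ q0 :: qs := (hmemsplit cell).2 (Or.inr rfl)
      have hlen : (q0 :: qs).length = queue'.length + 1 := by
        rw [← hsplit, List.length_append, List.length_singleton]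
      by_cases hc : cell ∈ comp
      · -- skip: cell already in comp
        have hstep : pvAStep fr cs (pvC2C fr cs) (f + 1) (q0 :: qs) comp ids
              (rem0.filter (fun c => !(PySem.Set.contains comp c)))
            = pvAStep fr cs (pvC2C fr cs) f queue' comp ids
              (rem0.filter (fun c => !(PySem.Set.contains comp c))) := by
          simp only [pvAStep]
          rw [if_pos ((PySem.Set.contains_iff comp cell).2 hc)]
        rw [hstep]
        refine ih queue' comp ids hnd hidnd h3
          (fun c hcq => h4 c ((hmemsplit c).2 (Or.inl hcq))) ?_ h6 h7 ?_ ?_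
        · rcases h5 with h | h
          · exact Or.inl h
          · rcases (hmemsplit start).1 h with h' | rfl
            · exact Or.inr h'
            · exact Or.inl hc
        · intro i hi k hk hik d hd hdf
          rcases h8 i hi k hk hik d hd hdf with h | h
          · exact Or.inl h
          · rcases (hmemsplit d).1 h with h' | rfl
            · exact Or.inr h'
            · exact Or.inl hc
        · rw [hlen] at hbound; omega
      · -- process cell
        have hcb : PySem.Set.contains comp cell = false := by
          rw [pvContains_eq_decide]; simp [hc]
        set comp2 := PySem.Set.add comp cell with hcomp2
        have hcompapp : comp2 = comp ++ [cell] := PySem.Set.add_of_not_mem hc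
        have hmemcomp2 : ∀ a, a ∈ comp2 ↔ a ∈ comp ∨ a = cell := by
          intro a; rw [hcompapp, List.mem_append, List.mem_singleton]
        have hcellfr : cell ∈ fr := (h4 cell hcellq).1
        have hcellreach : pvReach fr cs start cell := (h4 cell hcellq).2
        set L := (pvC2C fr cs).getD cell [] with hLdef
        have hL : ∀ i ∈ L, ∃ k : Nat, k < cs.length ∧ i = (k : Int) := by
          intro i hi
          rw [hLdef, mem_getD_pvC2C] at hi
          obtain ⟨_, k, hk, rfl, _⟩ := hi
          exact ⟨k, hk, rfl⟩
        obtain ⟨c1, c2, c3, c4, c5, c6⟩ := pvCidFold_spec fr cs comp2 L hL queue' ids hidnd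
        set stt := L.foldl (pvCidStep fr cs comp2) (queue', ids) with hstt
        have hstep : pvAStep fr cs (pvC2C fr cs) (f + 1) (q0 :: qs) comp ids
              (rem0.filter (fun c => !(PySem.Set.contains comp c)))
            = pvAStep fr cs (pvC2C fr cs) f stt.1 comp2 stt.2
              (PySem.Set.discard (rem0.filter (fun c => !(PySem.Set.contains comp c))) cell) := by
          simp only [pvAStep]
          rw [if_neg (by rw [hcb]; exact Bool.false_ne_true)]
          rfl
        have hrem : PySem.Set.discard (rem0.filter (fun c => !(PySem.Set.contains comp c))) cell
            = rem0.filter (fun c => !(PySem.Set.contains comp2 c)) := by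
          unfold PySem.Set.discard
          rw [List.filter_filter]
          refine List.filter_congr ?_
          intro a _
          rw [pvContains_eq_decide, pvContains_eq_decide]
          by_cases h1 : a = cell
          · subst h1; simp [hmemcomp2]
          · by_cases h2 : a ∈ comp <;> simp [h1, h2, hmemcomp2]
        rw [hstep, hrem]
        -- establish invariants for recursive call
        have r3 : ∀ c ∈ comp2, c ∈ fr ∧ pvReach fr cs start c := by
          intro c hcm
          rcases (hmemcomp2 c).1 hcm with h | rfl
          · exact h3 c h
          · exact ⟨hcellfr, hcellreach⟩
        have hLadj : ∀ i ∈ L, ∀ d ∈ (PySem.List.pyGetD cs i ([], 0)).1, d ∈ fr →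
            pvAdj fr cs cell d := by
          intro i hi d hd hdf
          rw [hLdef, mem_getD_pvC2C] at hi
          obtain ⟨_, k, hk, rfl, hcellk⟩ := hi
          rw [PySem.List.pyGetD_natCast] at hd
          have hmem : cs.getD k ([], 0) ∈ cs := by
            rw [List.getD_eq_getElem cs ([], 0) hk]
            exact List.getElem_mem hk
          exact ⟨hcellfr, hdf, cs.getD k ([], 0), hmem, hcellk, hd⟩
        have r4 : ∀ c ∈ stt.1, c ∈ fr ∧ pvReach fr cs start c := by
          intro c hcm
          rcases c4 c hcm with h | ⟨i, hi, hd, hdf, _⟩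
          · exact h4 c ((hmemsplit c).2 (Or.inl h))
          · exact ⟨hdf, hcellreach.tail (hLadj i hi c hd hdf)⟩
        have r5 : start ∈ comp2 ∨ start ∈ stt.1 := by
          rcases h5 with h | h
          · exact Or.inl ((hmemcomp2 start).2 (Or.inl h))
          · rcases (hmemsplit start).1 h with h' | heq
            · exact Or.inr (c3 start h')
            · exact Or.inl ((hmemcomp2 start).2 (Or.inr heq))
        have r6 : ∀ i ∈ stt.2, ∃ c ∈ comp2, i ∈ (pvC2C fr cs).getD c [] := by
          intro i hi
          rcases (c2 i).1 hi with h | h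
          · obtain ⟨c, hcm, hg⟩ := h6 i h
            exact ⟨c, (hmemcomp2 c).2 (Or.inl hcm), hg⟩
          · exact ⟨cell, (hmemcomp2 cell).2 (Or.inr rfl), h⟩
        have r7 : ∀ c ∈ comp2, ∀ i ∈ (pvC2C fr cs).getD c [], i ∈ stt.2 := by
          intro c hcm i hg
          rcases (hmemcomp2 c).1 hcm with h | rfl
          · exact (c2 i).2 (Or.inl (h7 c h i hg))
          · exact (c2 i).2 (Or.inr hg)
        have r8 : ∀ i ∈ stt.2, ∀ k : Nat, k < cs.length → i = (k : Int) →
            ∀ d ∈ (cs.getD k ([], 0)).1, d ∈ fr → d ∈ comp2 ∨ d ∈ stt.1 := by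
          intro i hi k hk hik d hd hdf
          rcases (c2 i).1 hi with h | h
          · rcases h8 i h k hk hik d hd hdf with h' | h'
            · exact Or.inl ((hmemcomp2 d).2 (Or.inl h'))
            · rcases (hmemsplit d).1 h' with h'' | heq
              · exact Or.inr (c3 d h'')
              · exact Or.inl ((hmemcomp2 d).2 (Or.inr heq))
          · rcases c5 i h with h' | h'
            · -- i was already in ids
              rcases h8 i h' k hk hik d hd hdf with h'' | h''
              · exact Or.inl ((hmemcomp2 d).2 (Or.inl h''))
              · rcases (hmemsplit d).1 h'' with h3' | heq
                · exact Or.inr (c3 d h3')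
                · exact Or.inl ((hmemcomp2 d).2 (Or.inr heq))
            · by_cases hdc : d ∈ comp2
              · exact Or.inl hdc
              · refine Or.inr (h' d ?_ hdf hdc)
                subst hik
                rw [PySem.List.pyGetD_natCast]
                exact hd
        have rbound : stt.1.length + pvPend cs stt.2 ≤ f := by
          rw [hlen] at hbound
          omega
        exact ih stt.1 comp2 stt.2
          (by rw [hcompapp]; exact List.Nodup.append hnd (List.nodup_singleton cell)
                (by intro a ha hb; rw [List.mem_singleton] at hb; subst hb; exact hc ha))
          c1 r3 r4 r5 r6 r7 r8 rbound

lemma pvBCellsFold_spec (fcells : List (Int × Int)) :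
    ∀ (st : PySem.Set (Int × Int) × Bool),
    (fcells.foldl (fun st c =>
        if PySem.Set.contains st.1 c then st else (PySem.Set.add st.1 c, true)) st).1
      = PySem.Set.update st.1 fcells ∧
    (st.2 = true → (fcells.foldl (fun st c =>
        if PySem.Set.contains st.1 c then st else (PySem.Set.add st.1 c, true)) st).2 = true) ∧
    ((fcells.foldl (fun st c =>
        if PySem.Set.contains st.1 c then st else (PySem.Set.add st.1 c, true)) st).2 = false →
      st.2 = false ∧ ∀ c ∈ fcells, c ∈ st.1) ∧
    ((fcells.foldl (fun st c =>
        if PySem.Set.contains st.1 c then st else (PySem.Set.add st.1 c, true)) st).2 = true →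
      st.2 = true ∨ st.1.length < (fcells.foldl (fun st c =>
        if PySem.Set.contains st.1 c then st else (PySem.Set.add st.1 c, true)) st).1.length) := by
  induction fcells with
  | nil => intro st; simp [PySem.Set.update]
  | cons x xs ih =>
    intro st
    simp only [List.foldl_cons]
    by_cases hx : PySem.Set.contains st.1 x
    · rw [if_pos hx]
      have hxm : x ∈ st.1 := (PySem.Set.contains_iff st.1 x).1 hx
      obtain ⟨i1, i2, i3, i4⟩ := ih st
      refine ⟨?_, i2, ?_, i4⟩
      · rw [i1, PySem.Set.update_cons, PySem.Set.add_of_mem hxm]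
      · intro h
        obtain ⟨h1, h2⟩ := i3 h
        refine ⟨h1, fun c hc => ?_⟩
        rcases List.mem_cons.1 hc with h' | h'
        · exact h' ▸ hxm
        · exact h2 c h' 
    · rw [if_neg hx]
      obtain ⟨i1, i2, i3, i4⟩ := ih (PySem.Set.add st.1 x, true)
      have hxm : x ∉ st.1 := fun h => hx ((PySem.Set.contains_iff st.1 x).2 h)
      refine ⟨?_, fun _ => i2 rfl, ?_, ?_⟩
      · rw [i1, PySem.Set.update_cons]
      · intro h; rw [i2 rfl] at h; cases h
      · intro _
        right
        rcases i4 (i2 rfl) with _ | hlt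
        · rw [i1, PySem.Set.update_eq_append_filter, List.length_append,
            PySem.Set.add_of_not_mem hxm, List.length_append, List.length_singleton]
          omega
        · calc st.1.length < (PySem.Set.add st.1 x).length := by
                rw [PySem.Set.add_of_not_mem hxm, List.length_append]; simp
            _ ≤ _ := le_of_lt hlt

lemma pvBids_pairwise (cs : List ((List (Int × Int)) × Int)) (P : Int × ((List (Int × Int)) × Int) → Bool) :
    (((PySem.List.enumerate cs).filter P).map (fun p => p.1)).Pairwise (· < ·) := by
  have hmono : ∀ (l : List ((List (Int × Int)) × Int)) (j : Int),
      ((PySem.List.enumerate l j).map (fun p => p.1)).Pairwise (· < ·) := by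
    intro l
    induction l with
    | nil => intro j; simp [PySem.List.enumerate]
    | cons t ts ih =>
      intro j
      rw [PySem.List.enumerate.eq_2]
      simp only [List.map_cons, List.pairwise_cons]
      refine ⟨?_, ih (j + 1)⟩
      intro a ha
      simp only [List.mem_map] at ha
      obtain ⟨p, hp, rfl⟩ := ha
      rw [PySem.List.mem_enumerate_iff] at hp
      obtain ⟨k, hk, rfl⟩ := hp
      simp; omega
  exact List.Pairwise.sublist (List.Sublist.map (fun (p : Int × ((List (Int × Int)) × Int)) => p.1) (List.filter_sublist (p := P))) (hmono cs 0)

lemma pvPass_len_mono (fr : List (Int × Int)) :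
    ∀ (l : List ((List (Int × Int)) × Int)) (st : PySem.Set (Int × Int) × Bool),
    st.1.length ≤ ((l.foldl (fun (st : PySem.Set (Int × Int) × Bool) t =>
        let fcells := t.1.filter (fun c => PySem.Set.contains fr c)
        if fcells.any (fun c => PySem.Set.contains st.1 c) then
          fcells.foldl (fun st c =>
            if PySem.Set.contains st.1 c then st else (PySem.Set.add st.1 c, true)) st
        else st) st)).1.length := by
  intro l
  induction l with
  | nil => intro st; simp
  | cons t ts ih =>
    intro st
    simp only [List.foldl_cons]
    set fcells := t.1.filter (fun c => PySem.Set.contains fr c)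
    by_cases hany : fcells.any (fun c => PySem.Set.contains st.1 c)
    · rw [if_pos hany]
      refine le_trans ?_ (ih _)
      obtain ⟨b1, _, _, _⟩ := pvBCellsFold_spec fcells st
      rw [b1, PySem.Set.update_eq_append_filter, List.length_append]
      omega
    · rw [if_neg hany]
      exact ih st

lemma pvPass_spec (fr : List (Int × Int)) (cs : List ((List (Int × Int)) × Int))
    (start : Int × Int) (l : List ((List (Int × Int)) × Int)) (hl : ∀ t ∈ l, t ∈ cs) :
    ∀ (comp : PySem.Set (Int × Int)) (ch : Bool), comp.Nodup →
    (∀ c ∈ comp, c ∈ fr ∧ pvReach fr cs start c) →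
    ((l.foldl (fun (st : PySem.Set (Int × Int) × Bool) t =>
        let fcells := t.1.filter (fun c => PySem.Set.contains fr c)
        if fcells.any (fun c => PySem.Set.contains st.1 c) then
          fcells.foldl (fun st c =>
            if PySem.Set.contains st.1 c then st else (PySem.Set.add st.1 c, true)) st
        else st) (comp, ch)).1.Nodup) ∧
    (∀ c ∈ comp, c ∈ (l.foldl (fun (st : PySem.Set (Int × Int) × Bool) t =>
        let fcells := t.1.filter (fun c => PySem.Set.contains fr c)
        if fcells.any (fun c => PySem.Set.contains st.1 c) then
          fcells.foldl (fun st c =>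
            if PySem.Set.contains st.1 c then st else (PySem.Set.add st.1 c, true)) st
        else st) (comp, ch)).1) ∧
    (∀ c ∈ (l.foldl (fun (st : PySem.Set (Int × Int) × Bool) t =>
        let fcells := t.1.filter (fun c => PySem.Set.contains fr c)
        if fcells.any (fun c => PySem.Set.contains st.1 c) then
          fcells.foldl (fun st c =>
            if PySem.Set.contains st.1 c then st else (PySem.Set.add st.1 c, true)) st
        else st) (comp, ch)).1, c ∈ fr ∧ pvReach fr cs start c) ∧
    ((l.foldl (fun (st : PySem.Set (Int × Int) × Bool) t =>
        let fcells := t.1.filter (fun c => PySem.Set.contains fr c)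
        if fcells.any (fun c => PySem.Set.contains st.1 c) then
          fcells.foldl (fun st c =>
            if PySem.Set.contains st.1 c then st else (PySem.Set.add st.1 c, true)) st
        else st) (comp, ch)).2 = false →
      (l.foldl (fun (st : PySem.Set (Int × Int) × Bool) t =>
        let fcells := t.1.filter (fun c => PySem.Set.contains fr c)
        if fcells.any (fun c => PySem.Set.contains st.1 c) then
          fcells.foldl (fun st c =>
            if PySem.Set.contains st.1 c then st else (PySem.Set.add st.1 c, true)) st
        else st) (comp, ch)).1 = comp ∧ ch = false ∧
      ∀ t ∈ l, (∃ c ∈ t.1, c ∈ fr ∧ c ∈ comp) → (∀ d ∈ t.1, d ∈ fr → d ∈ comp)) ∧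
    ((l.foldl (fun (st : PySem.Set (Int × Int) × Bool) t =>
        let fcells := t.1.filter (fun c => PySem.Set.contains fr c)
        if fcells.any (fun c => PySem.Set.contains st.1 c) then
          fcells.foldl (fun st c =>
            if PySem.Set.contains st.1 c then st else (PySem.Set.add st.1 c, true)) st
        else st) (comp, ch)).2 = true →
      ch = true ∨ comp.length < (l.foldl (fun (st : PySem.Set (Int × Int) × Bool) t =>
        let fcells := t.1.filter (fun c => PySem.Set.contains fr c)
        if fcells.any (fun c => PySem.Set.contains st.1 c) then
          fcells.foldl (fun st c =>
            if PySem.Set.contains st.1 c then st else (PySem.Set.add st.1 c, true)) st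
        else st) (comp, ch)).1.length) := by
  induction l with
  | nil =>
    intro comp ch hnd hsub
    refine ⟨hnd, fun c hc => hc, hsub, ?_, by simp⟩
    intro h
    exact ⟨rfl, by simpa using h, by simp⟩
  | cons t ts ih =>
    intro comp ch hnd hsub
    have hts : ∀ u ∈ ts, u ∈ cs := fun u hu => hl u (List.mem_cons_of_mem t hu)
    have htc : t ∈ cs := hl t List.mem_cons_self
    simp only [List.foldl_cons]
    set fcells := t.1.filter (fun c => PySem.Set.contains fr c) with hfc
    by_cases hany : fcells.any (fun c => PySem.Set.contains comp c)
    · rw [if_pos hany]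
      obtain ⟨b1, b2, b3, b4⟩ := pvBCellsFold_spec fcells (comp, ch)
      set st1 := (fcells.foldl (fun st c =>
            if PySem.Set.contains st.1 c then st else (PySem.Set.add st.1 c, true)) (comp, ch)) with hst1
      -- facts about st1.1 = update comp fcells
      have hnd1 : st1.1.Nodup := by rw [b1]; exact PySem.Set.nodup_update comp fcells hnd
      have hsub1 : ∀ c ∈ st1.1, c ∈ fr ∧ pvReach fr cs start c := by
        intro c hc
        rw [b1, PySem.Set.mem_update] at hc
        rcases hc with hc | hc
        · exact hsub c hc
        · -- c ∈ fcells : c ∈ t.1 ∧ c ∈ fr ; some cell of fcells is in comp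
          rw [hfc, List.mem_filter] at hc
          obtain ⟨hct, hcf⟩ := hc
          have hcf' : c ∈ fr := (PySem.Set.contains_iff fr c).1 hcf
          obtain ⟨b, hb⟩ := List.any_eq_true.1 hany
          obtain ⟨hbm, hbc⟩ := hb
          rw [hfc, List.mem_filter] at hbm
          have hbf : b ∈ fr := (PySem.Set.contains_iff fr b).1 hbm.2
          have hbcomp : b ∈ comp := (PySem.Set.contains_iff comp b).1 hbc
          obtain ⟨_, hbr⟩ := hsub b hbcomp
          exact ⟨hcf', hbr.tail ⟨hbf, hcf', t, htc, hbm.1, hct⟩⟩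
      obtain ⟨j1, j2, j3, j4, j5⟩ := ih hts st1.1 st1.2 hnd1 hsub1
      -- note: foldl from st1 = foldl from (st1.1, st1.2)
      have hrw : st1 = (st1.1, st1.2) := rfl
      rw [← hrw] at j1 j2 j3 j4 j5
      refine ⟨j1, ?_, j3, ?_, ?_⟩
      · intro c hc
        apply j2
        rw [b1, PySem.Set.mem_update]; exact Or.inl hc
      · intro h
        obtain ⟨e1, e2, e3⟩ := j4 h
        -- st1.2 = false forces everything stable
        have hb3 := b3 e2
        obtain ⟨hch, hall⟩ := hb3
        have hcomp1 : st1.1 = comp := by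
          rw [b1, PySem.Set.update_eq_append_filter]
          have : (PySem.Set.ofList fcells).filter (fun y => !(PySem.Set.contains comp y)) = [] := by
            rw [List.filter_eq_nil_iff]
            intro a ha
            have hma := hall a ((PySem.Set.mem_ofList fcells a).1 ha)
            simpa using hma
          rw [this, List.append_nil]
        rw [hcomp1] at e1
        refine ⟨e1, hch, ?_⟩
        intro u hu hex
        rcases List.mem_cons.1 hu with rfl | hu'
        · intro d hd hdf
          apply hall
          rw [hfc, List.mem_filter]
          exact ⟨hd, (PySem.Set.contains_iff fr d).2 hdf⟩
        · have := e3 u hu'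
          rw [hcomp1] at this
          exact this hex
      · intro h
        rcases j5 h with hst2 | hlt
        · rcases b4 hst2 with hch | hlen
          · exact Or.inl hch
          · right
            calc comp.length < st1.1.length := by rw [hst1]; exact hlen
              _ ≤ _ := by
                  have := pvPass_len_mono fr ts (st1.1, st1.2)
                  simpa using this
        · right
          calc comp.length ≤ st1.1.length := by
                rw [b1, PySem.Set.update_eq_append_filter, List.length_append]; dsimp only; omega
            _ < _ := hlt
    · rw [if_neg hany]
      obtain ⟨j1, j2, j3, j4, j5⟩ := ih hts comp ch hnd hsub
      refine ⟨j1, j2, j3, ?_, j5⟩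
      intro h
      obtain ⟨e1, e2, e3⟩ := j4 h
      refine ⟨e1, e2, ?_⟩
      intro u hu hex
      rcases List.mem_cons.1 hu with rfl | hu'
      · -- contradicts hany = false
        exfalso
        obtain ⟨c, hc1, hc2, hc3⟩ := hex
        apply hany
        refine List.any_eq_true.2 ⟨c, ?_, (PySem.Set.contains_iff comp c).2 hc3⟩
        rw [hfc, List.mem_filter]
        exact ⟨hc1, (PySem.Set.contains_iff fr c).2 hc2⟩
      · exact e3 u hu' hex

lemma pvGrow_spec (fr : List (Int × Int)) (cs : List ((List (Int × Int)) × Int))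
    (start : Int × Int) :
    ∀ (fuel : Nat) (comp : PySem.Set (Int × Int)), comp.Nodup → start ∈ comp →
    (∀ c ∈ comp, c ∈ fr ∧ pvReach fr cs start c) →
    fr.toFinset.card < fuel + comp.length →
    (pvGrow fr cs fuel comp).Nodup ∧
    (∀ c, c ∈ pvGrow fr cs fuel comp ↔ c ∈ fr ∧ pvReach fr cs start c) := by
  intro fuel
  induction fuel with
  | zero =>
    intro comp hnd hstart hsub hcard
    exfalso
    -- comp is a nodup list of elements of fr, so |comp| ≤ card fr.toFinset < 0 + |comp|
    have h1 : comp.toFinset.card = comp.length := List.toFinset_card_of_nodup hnd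
    have h2 : comp.toFinset ⊆ fr.toFinset := by
      intro a ha
      rw [List.mem_toFinset] at ha ⊢
      exact (hsub a ha).1
    have := Finset.card_le_card h2
    omega
  | succ n ih =>
    intro comp hnd hstart hsub hcard
    rw [pvGrow]
    obtain ⟨p1, p2, p3, p4, p5⟩ := pvPass_spec fr cs start cs (fun t ht => ht) comp false hnd hsub
    set st := cs.foldl
      (fun (st : PySem.Set (Int × Int) × Bool) t =>
        let fcells := t.1.filter (fun c => PySem.Set.contains fr c)
        if fcells.any (fun c => PySem.Set.contains st.1 c) then
          fcells.foldl (fun st c =>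
            if PySem.Set.contains st.1 c then st else (PySem.Set.add st.1 c, true)) st
        else st)
      (comp, false) with hst
    by_cases h2 : st.2
    · rw [if_pos h2]
      rcases p5 h2 with hfalse | hlt
      · cases hfalse
      · refine ih st.1 p1 (p2 start hstart) p3 ?_
        omega
    · rw [if_neg h2]
      obtain ⟨e1, _, e3⟩ := p4 (by simpa using h2)
      rw [e1]
      refine ⟨hnd, fun c => ⟨fun hc => hsub c hc, ?_⟩⟩
      rintro ⟨hcf, hcr⟩
      -- path induction: comp is closed under pvAdj
      have hclosed : ∀ a ∈ comp, ∀ b, pvAdj fr cs a b → b ∈ comp := by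
        rintro a ha b ⟨haf, hbf, t, ht, hat, hbt⟩
        exact e3 t ht ⟨a, hat, haf, ha⟩ b hbt hbf
      clear hcf
      induction hcr with
      | refl => exact hstart
      | tail hr hadj ihp =>
        exact hclosed _ ihp _ hadj

lemma pvEntry_eq (fr : List (Int × Int)) (cs : List ((List (Int × Int)) × Int))
    (start : Int × Int) (compA : PySem.Set (Int × Int)) (idsA : PySem.Set Int)
    (compB : PySem.Set (Int × Int))
    (hA : ∀ c, c ∈ compA ↔ c ∈ fr ∧ pvReach fr cs start c) (hAnd : compA.Nodup)
    (hI : ∀ i, i ∈ idsA ↔ ∃ c, (c ∈ fr ∧ pvReach fr cs start c) ∧ i ∈ (pvC2C fr cs).getD c [])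
    (hInd : idsA.Nodup)
    (hB : ∀ c, c ∈ compB ↔ c ∈ fr ∧ pvReach fr cs start c) (hBnd : compB.Nodup) :
    (PySem.List.sorted compA (fun c => (toLex (c.1, c.2) : Lex (Int × Int))),
     (PySem.List.sorted idsA (fun i => i)).map (fun cid => PySem.List.pyGetD cs cid ([], 0)))
    = (PySem.List.sorted compB (fun c => (toLex (c.1, c.2) : Lex (Int × Int))),
       ((PySem.List.enumerate cs).foldl (fun acc p =>
          if p.2.1.any (fun c => PySem.Set.contains fr c && PySem.Set.contains compB c)
          then acc ++ [p.1] else acc) []).map (fun i => PySem.List.pyGetD cs i ([], 0))) := by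
  have hcomp : PySem.List.sorted compA (fun c => (toLex (c.1, c.2) : Lex (Int × Int)))
      = PySem.List.sorted compB (fun c => (toLex (c.1, c.2) : Lex (Int × Int))) := by
    refine PySem.List.sorted_eq_sorted_of_perm compA compB _ ?_ ?_
    · intro a b h
      have := congrArg (fun x => ofLex x) h
      simpa using this
    · rw [List.perm_ext_iff_of_nodup hAnd hBnd]
      intro a
      rw [hA, hB]
  -- id lists
  set P : Int × ((List (Int × Int)) × Int) → Bool :=
    fun p => p.2.1.any (fun c => PySem.Set.contains fr c && PySem.Set.contains compB c) with hP
  have hfold : (PySem.List.enumerate cs).foldl (fun acc p =>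
      if P p then acc ++ [p.1] else acc) []
      = ((PySem.List.enumerate cs).filter P).map (fun p => p.1) := by
    rw [PySem.List.foldl_append_if P (fun p => p.1) (PySem.List.enumerate cs) []]
    simp
  have hpw := pvBids_pairwise cs P
  have hmemB : ∀ j, j ∈ ((PySem.List.enumerate cs).filter P).map (fun p => p.1)
      ↔ ∃ k : Nat, k < cs.length ∧ j = (k : Int) ∧
          (cs.getD k ([], 0)).1.any (fun c => PySem.Set.contains fr c && PySem.Set.contains compB c) = true := by
    intro j
    simp only [List.mem_map, List.mem_filter]
    constructor
    · rintro ⟨p, ⟨hpm, hpP⟩, rfl⟩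
      rw [PySem.List.mem_enumerate_iff] at hpm
      obtain ⟨k, hk, rfl⟩ := hpm
      refine ⟨k, hk, by simp, ?_⟩
      rw [List.getD_eq_getElem cs ([], 0) hk]
      exact hpP
    · rintro ⟨k, hk, rfl, hany⟩
      refine ⟨((k : Int), cs[k]), ⟨?_, ?_⟩, by simp⟩
      · rw [PySem.List.mem_enumerate_iff]
        exact ⟨k, hk, by simp⟩
      · rw [List.getD_eq_getElem cs ([], 0) hk] at hany
        exact hany
  have hmemA : ∀ j, j ∈ idsA ↔ ∃ k : Nat, k < cs.length ∧ j = (k : Int) ∧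
      (cs.getD k ([], 0)).1.any (fun c => PySem.Set.contains fr c && PySem.Set.contains compB c) = true := by
    intro j
    rw [hI]
    constructor
    · rintro ⟨c, hS, hg⟩
      rw [mem_getD_pvC2C] at hg
      obtain ⟨hcf, k, hk, rfl, hck⟩ := hg
      refine ⟨k, hk, rfl, ?_⟩
      rw [List.any_eq_true]
      refine ⟨c, hck, ?_⟩
      rw [Bool.and_eq_true, (PySem.Set.contains_iff fr c).2 hcf]
      exact ⟨rfl, (PySem.Set.contains_iff compB c).2 ((hB c).2 hS)⟩
    · rintro ⟨k, hk, rfl, hany⟩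
      rw [List.any_eq_true] at hany
      obtain ⟨c, hck, hc⟩ := hany
      rw [Bool.and_eq_true] at hc
      have hcf : c ∈ fr := (PySem.Set.contains_iff fr c).1 hc.1
      have hcb : c ∈ compB := (PySem.Set.contains_iff compB c).1 hc.2
      refine ⟨c, (hB c).1 hcb, ?_⟩
      rw [mem_getD_pvC2C]
      exact ⟨hcf, k, hk, rfl, hck⟩
  have hids : PySem.List.sorted idsA (fun i => i)
      = ((PySem.List.enumerate cs).filter P).map (fun p => p.1) := by
    refine PySem.List.sorted_eq_of_perm_of_pairwise_lt idsA _ (fun i => i) ?_ ?_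
    · rw [List.perm_ext_iff_of_nodup ?_ hInd]
      · intro a
        rw [hmemB, hmemA]
      · exact List.Pairwise.imp (fun h => ne_of_lt h) hpw
    · exact hpw
  rw [hcomp, hfold, hids]

lemma pvOuter_eq (fr : List (Int × Int)) (cs : List ((List (Int × Int)) × Int)) :
    ∀ (tail prefixL : List (Int × Int)) (done : PySem.Set (Int × Int))
      (acc : List ((List (Int × Int)) × (List ((List (Int × Int)) × Int)))) (fuelA : Nat)
      (remA : List (Int × Int)),
    fr = prefixL ++ tail →
    (∀ c ∈ prefixL, c ∈ done) →
    remA = (PySem.Set.ofList fr).filter (fun c => !(PySem.Set.contains done c)) →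
    remA.length < fuelA →
    (tail.foldl
      (fun (st : PySem.Set (Int × Int) × List ((List (Int × Int)) × (List ((List (Int × Int)) × Int)))) start =>
        if PySem.Set.contains st.1 start then st
        else
          let comp := pvGrow fr cs (fr.length + 1) (PySem.Set.add PySem.Set.empty start)
          let ids := (PySem.List.enumerate cs).foldl
            (fun acc p =>
              if p.2.1.any (fun c => PySem.Set.contains fr c && PySem.Set.contains comp c)
              then acc ++ [p.1] else acc) []
          (PySem.Set.update st.1 comp,
           st.2 ++ [(PySem.List.sorted comp (fun c => (toLex (c.1, c.2) : Lex (Int × Int))),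
                     ids.map (fun i => PySem.List.pyGetD cs i ([], 0)))]))
      (done, acc)).2
    = pvAOuter fr cs (pvC2C fr cs)
        (fr.length + (cs.map (fun t => t.1.length)).sum + 2) fuelA remA acc := by
  intro tail
  induction tail with
  | nil =>
    intro prefixL done acc fuelA remA hsplit hpre hrem hfuel
    have hempty : remA = [] := by
      rw [hrem, List.filter_eq_nil_iff]
      intro a ha
      have haf : a ∈ fr := (PySem.Set.mem_ofList fr a).1 ha
      have had : a ∈ done := hpre a (by rwa [hsplit, List.append_nil] at haf)
      rw [pvContains_eq_decide]
      simp [had]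
    subst hempty
    rcases fuelA with _ | fa
    · omega
    · simp only [List.foldl_nil, pvAOuter]
  | cons t ts ih =>
    intro prefixL done acc fuelA remA hsplit hpre hrem hfuel
    simp only [List.foldl_cons]
    by_cases ht : t ∈ done
    · rw [if_pos ((PySem.Set.contains_iff done t).2 ht)]
      refine ih (prefixL ++ [t]) done acc fuelA remA ?_ ?_ hrem hfuel
      · rw [hsplit, List.append_assoc, List.singleton_append]
      · intro c hc
        rcases List.mem_append.1 hc with h | h
        · exact hpre c h
        · rw [List.mem_singleton] at h; subst h; exact ht
    · have htb : PySem.Set.contains done t = false := by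
        rw [pvContains_eq_decide]; simp [ht]
      rw [if_neg (by rw [htb]; exact Bool.false_ne_true)]
      have htfr : t ∈ fr := by rw [hsplit]; exact List.mem_append_right _ List.mem_cons_self
      -- remA = t :: rest
      have hnotpre : t ∉ prefixL := fun h => ht (hpre t h)
      have hremA : remA = t :: ((PySem.Set.ofList ts).discard t).filter
          (fun c => !(PySem.Set.contains done c)) := by
        rw [hrem, hsplit, PySem.Set.ofList_append, PySem.Set.update_eq_append_filter,
          List.filter_append, List.filter_filter]
        have h1 : (PySem.Set.ofList prefixL).filter (fun c => !(PySem.Set.contains done c)) = [] := by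
          rw [List.filter_eq_nil_iff]
          intro a ha
          have : a ∈ done := hpre a ((PySem.Set.mem_ofList prefixL a).1 ha)
          rw [pvContains_eq_decide]; simp [this]
        rw [h1, List.nil_append]
        have h2 : ∀ a ∈ PySem.Set.ofList (t :: ts),
            ((fun c => !(PySem.Set.contains done c)) a
              && (fun y => !(PySem.Set.contains (PySem.Set.ofList prefixL) y)) a)
            = (fun c => !(PySem.Set.contains done c)) a := by
          intro a _
          simp only [pvContains_eq_decide]
          by_cases had : a ∈ done
          · simp [had]
          · have : a ∉ PySem.Set.ofList prefixL := by
              rw [PySem.Set.mem_ofList]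
              intro h
              exact had (hpre a h)
            simp [had, this]
        rw [List.filter_congr h2, PySem.Set.ofList_cons, List.filter_cons,
          if_pos (by rw [htb]; rfl)]
      rcases fuelA with _ | fa
      · omega
      · -- A side steps once
        rw [hremA]
        simp only [pvAOuter]
        rw [← hremA]
        -- inner loop spec, with rem0 := remA
        have hfid : remA = remA.filter (fun c => !(PySem.Set.contains (PySem.Set.empty : PySem.Set (Int × Int)) c)) := by
          refine (List.filter_eq_self.2 ?_).symm
          intro a _
          rw [pvContains_eq_decide]
          simp [PySem.Set.empty]
        have hbound : (1 : Nat) + pvPend cs PySem.Set.empty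
            ≤ fr.length + (cs.map (fun t => t.1.length)).sum + 2 := by
          have := pvPend_le_sum cs PySem.Set.empty
          omega
        have hspec := pvAStep_spec fr cs t remA
          (fr.length + (cs.map (fun t => t.1.length)).sum + 2) [t]
          PySem.Set.empty PySem.Set.empty
          List.nodup_nil List.nodup_nil
          (by intro c hc; cases hc)
          (by intro c hc; rw [List.mem_singleton] at hc; subst hc
              exact ⟨htfr, Relation.ReflTransGen.refl⟩)
          (Or.inr List.mem_cons_self)
          (by intro i hi; cases hi)
          (by intro c hc; cases hc)
          (by intro i hi; cases hi)
          (by simpa using hbound)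
        rw [← hfid] at hspec
        obtain ⟨a1, a2, a3, a4, a5⟩ := hspec
        set r := pvAStep fr cs (pvC2C fr cs)
          (fr.length + (cs.map (fun t => t.1.length)).sum + 2) [t]
          PySem.Set.empty PySem.Set.empty remA with hr
        -- B side component
        have hgrow := pvGrow_spec fr cs t (fr.length + 1) (PySem.Set.add PySem.Set.empty t)
          (by simp [PySem.Set.empty, PySem.Set.add])
          (by simp [PySem.Set.empty, PySem.Set.add])
          (by intro c hc
              simp only [PySem.Set.empty, PySem.Set.add] at hc
              have : c = t := by simpa using hc
              subst this
              exact ⟨htfr, Relation.ReflTransGen.refl⟩)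
          (by have h1 := List.toFinset_card_le fr
              have h2 : (PySem.Set.add (PySem.Set.empty : PySem.Set (Int × Int)) t).length = 1 := by
                simp [PySem.Set.empty, PySem.Set.add]
              omega)
        obtain ⟨g1, g2⟩ := hgrow
        set compB := pvGrow fr cs (fr.length + 1) (PySem.Set.add PySem.Set.empty t) with hcompB
        -- emitted entries are equal
        have hentry := pvEntry_eq fr cs t r.1 r.2.1 compB a2 a1 a4 a3 g2 g1
        rw [hentry]
        -- recurse
        refine ih (prefixL ++ [t]) (PySem.Set.update done compB) _ fa r.2.2 ?_ ?_ ?_ ?_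
        · rw [hsplit, List.append_assoc, List.singleton_append]
        · intro c hc
          rcases List.mem_append.1 hc with h | h
          · rw [PySem.Set.mem_update]; exact Or.inl (hpre c h)
          · rw [List.mem_singleton] at h
            rw [PySem.Set.mem_update]
            exact Or.inr (h ▸ (g2 t).2 ⟨htfr, Relation.ReflTransGen.refl⟩)
        · rw [a5, hrem, List.filter_filter]
          refine List.filter_congr ?_
          intro a _
          simp only [pvContains_eq_decide]
          by_cases h1 : a ∈ r.1
          · have h2 : a ∈ PySem.Set.update done compB := by
              rw [PySem.Set.mem_update]
              exact Or.inr ((g2 a).2 ((a2 a).1 h1))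
            simp [h1, h2]
          · by_cases h3 : a ∈ done
            · have h2 : a ∈ PySem.Set.update done compB := by
                rw [PySem.Set.mem_update]; exact Or.inl h3
              simp [h1, h2, h3]
            · have h2 : a ∉ PySem.Set.update done compB := by
                rw [PySem.Set.mem_update]
                rintro (h | h)
                · exact h3 h
                · exact h1 ((a2 a).2 ((g2 a).1 h))
              simp [h1, h2, h3]
        · -- fuel decreases
          have htr : t ∈ r.1 := (a2 t).2 ⟨htfr, Relation.ReflTransGen.refl⟩
          have hlt : r.2.2.length < remA.length := by
            rw [a5]
            refine List.length_filter_lt_length_iff_exists.2 ?_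
            refine ⟨t, by rw [hremA]; exact List.mem_cons_self, ?_⟩
            rw [pvContains_eq_decide]
            simp [htr]
          omega

-- ===== VERDICT (by name: the statement is the Claim_ definition above) =====
theorem split_frontier_components_spec : Claim_equal_split_frontier_components := by
  intro fr cs _
  unfold Spec_split_frontier_components split_frontier_components split_frontier_components_alt
  by_cases hfr : fr = []
  · subst hfr; rfl
  · rw [if_neg (by simpa [List.isEmpty_iff] using hfr)]
    refine (pvOuter_eq fr cs fr [] PySem.Set.empty [] (fr.length + 1) (PySem.Set.ofList fr)
      (by simp) (by simp) (by simp [PySem.Set.empty]) ?_).symm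
    have := PySem.Set.length_ofList_le fr
    omega
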